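-- pv_equiv track=rewrite | github.com/vinayrajabera/Kattis-Solutions-Python | SuperComputer.py | split_search
-- ===== SOURCE A (Python) =====
-- def split_search(a, start, end):
--     numOfOnes=0
--     if len(a[start:end+1]) <= 3:
--         numOfOnes= a[start:end+1].count(1)
--
--     else:
--         midPoint= int(end/2)+int(start/2)
--         numOfOnes+=split_search(a, start, midPoint)
--         numOfOnes+=split_search(a, midPoint+1, end)
--     return numOfOnes
-- ===== SOURCE B (Python) =====
-- def split_search(a, start, end):
--     total = 0
--     for x in a[start:end + 1]:
--         if x == 1:
--             total += 1
--     return total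
-- ===== Notes on version B (the rewrite author's own statement) =====
-- stated objective: simpler
-- what changed: Replaces A's binary split/midpoint recursion (with its <=3-element base case) by a single flat pass over the slice a[start:end+1] with an explicit counter.
-- outside the precondition, e.g. on split_search([2, 2, 2, 0, 1, 2], -6, 12): A returns 2, B returns 1; on split_search([1, 0, 1, 1, 0, 1, 0, 1, 1, 1], 2, -2): A raises RecursionError, B returns 5
import Mathlib
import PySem

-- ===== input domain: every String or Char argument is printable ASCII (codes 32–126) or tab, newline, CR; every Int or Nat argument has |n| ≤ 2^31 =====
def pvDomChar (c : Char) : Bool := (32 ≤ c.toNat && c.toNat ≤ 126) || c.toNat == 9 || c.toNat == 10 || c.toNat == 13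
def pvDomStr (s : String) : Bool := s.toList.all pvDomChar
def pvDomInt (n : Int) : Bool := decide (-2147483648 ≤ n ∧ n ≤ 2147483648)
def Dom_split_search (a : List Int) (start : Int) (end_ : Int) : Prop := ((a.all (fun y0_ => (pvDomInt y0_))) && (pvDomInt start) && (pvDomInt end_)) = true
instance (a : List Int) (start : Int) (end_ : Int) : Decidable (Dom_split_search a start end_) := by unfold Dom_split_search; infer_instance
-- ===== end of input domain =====

-- B replaces A's binary split/midpoint recursion by one flat counting pass over the same slice (objective: simpler).

-- ===== PORT A =====
-- Python's recursion has no structural measure in Lean, so the port carries a fuel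
-- guard that only makes the same computation total; on Pre_ the fuel never runs out
-- (lemma go_eq_count below). `int(end/2)` truncates toward zero: Int.tdiv is exact
-- here since |end_| ≤ 2^31 keeps end/2 an exact float.
def split_search_go (fuel : Nat) (a : List Int) (start end_ : Int) : Int :=
  match fuel with
  | 0 => 0
  | fuel + 1 =>
    let s := PySem.List.slice a (some start) (some (end_ + 1))
    if s.length ≤ 3 then (PySem.List.count s 1 : Int)
    else
      let midPoint := Int.tdiv end_ 2 + Int.tdiv start 2
      split_search_go fuel a start midPoint + split_search_go fuel a (midPoint + 1) end_

def split_search (a : List Int) (start : Int) (end_ : Int) : Int :=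
  split_search_go ((end_ + 1 - start).toNat + 1) a start end_

-- ===== PORT B =====
def split_search_alt (a : List Int) (start : Int) (end_ : Int) : Int :=
  (PySem.List.slice a (some start) (some (end_ + 1))).foldl
    (fun total x => if x == 1 then total + 1 else total) 0

-- ===== PRECONDITION & SPEC =====
-- Pre_ excludes inputs with a negative index and more than 3 elements in the slice: there
-- A's midpoint arithmetic mixes wrapped and unwrapped positions, so A either hits a
-- RecursionError or returns an accidental count of a different range.
def Pre_split_search (a : List Int) (start : Int) (end_ : Int) : Prop :=
  (0 ≤ start ∧ 0 ≤ end_) ∨ (PySem.List.slice a (some start) (some (end_ + 1))).length ≤ 3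
instance (a : List Int) (start : Int) (end_ : Int) : Decidable (Pre_split_search a start end_) := by
  unfold Pre_split_search; infer_instance

def pvWitness_split_search : List Int × Int × Int := ([1, 0, 1, 1, 0, 1, 2], 0, 6)

def Spec_split_search (a : List Int) (start : Int) (end_ : Int) (out : Int) : Prop := out = split_search_alt a start end_
instance (a : List Int) (start : Int) (end_ : Int) (out : Int) : Decidable (Spec_split_search a start end_ out) := by unfold Spec_split_search; infer_instance

-- ===== CLAIM (what is proved, stated in full; the proofs are below) =====
def Claim_equal_split_search : Prop := ∀ (a : List Int) (start : Int) (end_ : Int), Dom_split_search a start end_ → Pre_split_search a start end_ → Spec_split_search a start end_ (split_search a start end_)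

-- ===== LEMMAS AND PROOFS =====

-- B is the count of ones in the slice.
lemma alt_eq_count (a : List Int) (start end_ : Int) :
    split_search_alt a start end_ =
      ((PySem.List.slice a (some start) (some (end_ + 1))).count 1 : Int) := by
  unfold split_search_alt
  rw [PySem.List.foldl_beq_add_one]
  simp

-- Adjacent nonneg slices concatenate.
lemma slice_append (a : List Int) (s t u : Int) (hs : 0 ≤ s) (hst : s ≤ t) (htu : t ≤ u) :
    PySem.List.slice a (some s) (some t) ++ PySem.List.slice a (some t) (some u) =
      PySem.List.slice a (some s) (some u) := by
  rw [PySem.List.slice_toNat a hs (le_trans hs hst),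
      PySem.List.slice_toNat a (le_trans hs hst) (le_trans (le_trans hs hst) htu),
      PySem.List.slice_toNat a hs (le_trans (le_trans hs hst) htu)]
  have h1 : u.toNat - s.toNat = (t.toNat - s.toNat) + (u.toNat - t.toNat) := by omega
  rw [h1, List.take_add, List.drop_drop]
  have h2 : s.toNat + (t.toNat - s.toNat) = t.toNat := by omega
  rw [h2]

-- On nonneg indices, the fuel recursion computes the count of ones in the slice.
lemma go_eq_count (fuel : Nat) :
    ∀ (a : List Int) (start end_ : Int), 0 ≤ start → 0 ≤ end_ →
      (end_ + 1 - start).toNat ≤ fuel →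
      split_search_go fuel a start end_ =
        ((PySem.List.slice a (some start) (some (end_ + 1))).count 1 : Int) := by
  induction fuel with
  | zero =>
    intro a start end_ hs he hf
    have hse : end_ + 1 ≤ start := by omega
    have : PySem.List.slice a (some start) (some (end_ + 1)) = [] := by
      rw [PySem.List.slice_toNat a hs (by omega)]
      have : (end_ + 1).toNat - start.toNat = 0 := by omega
      simp [this]
    simp [split_search_go, this]
  | succ fuel ih =>
    intro a start end_ hs he hf
    unfold split_search_go
    by_cases hlen : (PySem.List.slice a (some start) (some (end_ + 1))).length ≤ 3
    · simp only [hlen, if_pos, PySem.List.count_eq]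
    · simp only [hlen, if_neg, not_false_iff]
      -- the slice has > 3 elements, so end_ ≥ start + 3
      have hgap : start + 3 ≤ end_ := by
        by_contra hcon
        apply hlen
        rw [PySem.List.slice_toNat a hs (by omega)]
        simp only [List.length_take, List.length_drop]
        omega
      have htd_e : Int.tdiv end_ 2 = end_ / 2 := Int.tdiv_eq_ediv_of_nonneg he
      have htd_s : Int.tdiv start 2 = start / 2 := Int.tdiv_eq_ediv_of_nonneg hs
      set mid := Int.tdiv end_ 2 + Int.tdiv start 2 with hmid
      have hmid_ge : start ≤ mid := by rw [hmid, htd_e, htd_s]; omega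
      have hmid_lt : mid < end_ := by rw [hmid, htd_e, htd_s]; omega
      rw [ih a start mid hs (by omega) (by omega),
          ih a (mid + 1) end_ (by omega) he (by omega)]
      rw [← Int.natCast_add, ← List.count_append,
          slice_append a start (mid + 1) (end_ + 1) hs (by omega) (by omega)]

-- ===== VERDICT (by name: the statement is the Claim_ definition above) =====
theorem split_search_spec : Claim_equal_split_search := by
  intro a start end_ _hdom hpre
  unfold Spec_split_search split_search
  rw [alt_eq_count]
  rcases hpre with ⟨hs, he⟩ | hlen
  · exact go_eq_count _ a start end_ hs he (by omega)
  · unfold split_search_go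
    simp only [hlen, if_pos, PySem.List.count_eq]
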